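-- pv_equiv track=rewrite | github.com/thomkuo/CS313E | Assignment1/Spiral.py | sum_adjacent_numbers
-- ===== SOURCE A (Python) =====
-- def sum_adjacent_numbers(spiral, n):
--     grid_length = len(spiral)
--     #Creates sum value
--     sum = 0
--     #Searches for value n in the spiral
--     for row in range(grid_length):
--         for col in range(grid_length):
--             #Once the spiral coordinates are found it triggers an if function
--             if spiral[row][col] == n:
--                 #Nested for loop tracks the values around the coordinates of value n
--                 for rinc in range(-1,2):
--                     for cinc in range (-1,2):
--                         #In bounds checker ensures there is no error
--                         if not in_bounds(spiral, row+rinc, col+cinc) or (rinc == 0 and cinc == 0):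
--                             continue
--                         #Sum value is created by adding each value around the coordinates of n
--                         sum += spiral[row+rinc][col+cinc]
--     return(sum)
--
-- def in_bounds(grid, row, col):
--     length = len(grid)
--     if row < 0 or row >= length or col >= length or col < 0:
--         return False
--     return True
-- ===== SOURCE B (Python) =====
-- OFFSETS = ((-1, -1), (-1, 0), (-1, 1), (0, -1), (0, 1), (1, -1), (1, 0), (1, 1))
--
-- def sum_adjacent_numbers(spiral, n):
--     size = len(spiral)
--     total = 0
--     for r in range(size):
--         for c in range(size):
--             count = 0
--             for dr, dc in OFFSETS:
--                 rr = r + dr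
--                 cc = c + dc
--                 if 0 <= rr < size and 0 <= cc < size and spiral[rr][cc] == n:
--                     count += 1
--             total += spiral[r][c] * count
--     return total
-- ===== Notes on version B (the rewrite author's own statement) =====
-- stated objective: alternative
-- what changed: Inverted the decomposition: instead of finding n-cells and adding each of their in-bounds neighbors, B visits every cell once, counts how many of its 8 in-bounds neighbors equal n, and adds the cell's value times that count; the per-cell neighbor-sum loop of A disappears in favor of a per-cell counter.
import Mathlib
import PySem

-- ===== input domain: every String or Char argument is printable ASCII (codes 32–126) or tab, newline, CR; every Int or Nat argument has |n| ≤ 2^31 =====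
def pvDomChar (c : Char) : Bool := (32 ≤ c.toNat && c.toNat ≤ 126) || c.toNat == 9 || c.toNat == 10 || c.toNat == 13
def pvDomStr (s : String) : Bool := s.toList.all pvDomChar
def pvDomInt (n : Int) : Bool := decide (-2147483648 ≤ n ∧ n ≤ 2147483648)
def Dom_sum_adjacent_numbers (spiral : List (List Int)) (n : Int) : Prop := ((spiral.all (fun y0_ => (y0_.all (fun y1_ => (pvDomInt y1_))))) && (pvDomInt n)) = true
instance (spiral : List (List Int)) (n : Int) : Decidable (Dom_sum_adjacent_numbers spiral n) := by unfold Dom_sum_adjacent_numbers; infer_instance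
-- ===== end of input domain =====

-- B inverts A's decomposition: for each cell it counts adjacent cells equal to n and adds value x count,
-- instead of A's find-n-cells-then-add-neighbors sweep (alternative decomposition, same asymptotic cost).


-- ===== PORT A =====
def in_bounds (grid : List (List Int)) (row col : Int) : Bool :=
  let length : Int := grid.length
  if row < 0 || row ≥ length || col ≥ length || col < 0 then false else true

def sum_adjacent_numbers (spiral : List (List Int)) (n : Int) : Int :=
  let grid_length : Int := spiral.length
  (PySem.List.pyRange 0 grid_length 1).foldl (fun sum row =>
    (PySem.List.pyRange 0 grid_length 1).foldl (fun sum col =>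
      if PySem.List.pyGetD (PySem.List.pyGetD spiral row []) col 0 = n then
        (PySem.List.pyRange (-1) 2 1).foldl (fun sum rinc =>
          (PySem.List.pyRange (-1) 2 1).foldl (fun sum cinc =>
            if (!(in_bounds spiral (row + rinc) (col + cinc)) || (decide (rinc = 0) && decide (cinc = 0))) then
              sum
            else
              sum + PySem.List.pyGetD (PySem.List.pyGetD spiral (row + rinc) []) (col + cinc) 0) sum) sum
      else sum) sum) 0

-- ===== PORT B =====
def pvOFFSETS : List (Int × Int) :=
  [(-1, -1), (-1, 0), (-1, 1), (0, -1), (0, 1), (1, -1), (1, 0), (1, 1)]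

def sum_adjacent_numbers_alt (spiral : List (List Int)) (n : Int) : Int :=
  let size : Int := spiral.length
  (PySem.List.pyRange 0 size 1).foldl (fun total r =>
    (PySem.List.pyRange 0 size 1).foldl (fun total c =>
      let count : Int := pvOFFSETS.foldl (fun count dd =>
        let rr := r + dd.1
        let cc := c + dd.2
        if 0 ≤ rr ∧ rr < size ∧ 0 ≤ cc ∧ cc < size ∧
            PySem.List.pyGetD (PySem.List.pyGetD spiral rr []) cc 0 = n then
          count + 1
        else count) 0
      total + PySem.List.pyGetD (PySem.List.pyGetD spiral r []) c 0 * count) total) 0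


-- ===== PRECONDITION & SPEC =====
-- Pre_ excludes exactly the inputs on which Python A raises IndexError (a row shorter than the
-- grid height: A indexes spiral[row][col] for every col < len(spiral)); Python B raises there too.
def Pre_sum_adjacent_numbers (spiral : List (List Int)) (n : Int) : Prop :=
  ∀ row ∈ spiral, spiral.length ≤ row.length
instance (spiral : List (List Int)) (n : Int) : Decidable (Pre_sum_adjacent_numbers spiral n) := by
  unfold Pre_sum_adjacent_numbers; infer_instance
def pvWitness_sum_adjacent_numbers : List (List Int) × Int := ([[1, 2], [3, 4]], 1)

def Spec_sum_adjacent_numbers (spiral : List (List Int)) (n : Int) (out : Int) : Prop := out = sum_adjacent_numbers_alt spiral n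
instance (spiral : List (List Int)) (n : Int) (out : Int) : Decidable (Spec_sum_adjacent_numbers spiral n out) := by unfold Spec_sum_adjacent_numbers; infer_instance

-- ===== CLAIM (what is proved, stated in full; the proofs are below) =====
def Claim_equal_sum_adjacent_numbers : Prop := ∀ (spiral : List (List Int)) (n : Int), Dom_sum_adjacent_numbers spiral n → Pre_sum_adjacent_numbers spiral n → Spec_sum_adjacent_numbers spiral n (sum_adjacent_numbers spiral n)

-- ===== LEMMAS AND PROOFS =====

-- proof helpers
def gg (sp : List (List Int)) (r c : Int) : Int :=
  PySem.List.pyGetD (PySem.List.pyGetD sp r []) c 0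

theorem ite_and_sum (P : Prop) [Decidable P] (s : Finset ℤ) (Q : ℤ → Prop) [DecidablePred Q] (f : ℤ → ℤ) :
    (∑ c ∈ s, if P ∧ Q c then f c else 0) = if P then (∑ c ∈ s, if Q c then f c else 0) else 0 := by
  by_cases h : P <;> simp [h]

def pieceTerm (sp : List (List Int)) (n L dr dc r c : Int) : Int :=
  if 0 ≤ r + dr ∧ r + dr < L ∧ 0 ≤ c + dc ∧ c + dc < L ∧ gg sp (r + dr) (c + dc) = n then
    gg sp r c else 0

def piece (sp : List (List Int)) (n L dr dc : Int) : Int :=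
  ((PySem.List.pyRange 0 L 1).map (fun r =>
    ((PySem.List.pyRange 0 L 1).map (fun c => pieceTerm sp n L dr dc r c)).sum)).sum

theorem list_range_sum (n : ℕ) (g : ℕ → ℤ) :
    ((List.range n).map g).sum = ∑ i ∈ Finset.range n, g i := by
  induction n with
  | zero => simp
  | succ m ih => rw [List.range_succ, List.map_append, List.sum_append, Finset.sum_range_succ, ih]; simp

theorem sum_map_pyRange_one (a b : Int) (f : Int → Int) :
    ((PySem.List.pyRange a b 1).map f).sum = ∑ x ∈ Finset.Ico a b, f x := by
  rw [PySem.List.pyRange_one, List.map_map, list_range_sum]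
  refine Finset.sum_nbij' (fun k => a + (k:ℤ)) (fun r => (r - a).toNat) ?_ ?_ ?_ ?_ ?_ <;>
    simp [Finset.mem_range, Finset.mem_Ico] <;> omega

theorem sum_shift1 (L d : Int) (f : Int → Int) :
    (∑ r ∈ Finset.Ico (0:ℤ) L, if 0 ≤ r + d ∧ r + d < L then f r else 0)
      = ∑ r ∈ Finset.Ico (0:ℤ) L, if 0 ≤ r - d ∧ r - d < L then f (r - d) else 0 := by
  rw [← Finset.sum_filter, ← Finset.sum_filter]
  refine Finset.sum_nbij' (fun r => r + d) (fun r => r - d) ?_ ?_ ?_ ?_ ?_ <;>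
    simp [Finset.mem_filter, Finset.mem_Ico] <;> omega

theorem sum_shift2 (L dr dc : Int) (F : Int → Int → Int) :
    (∑ r ∈ Finset.Ico (0:ℤ) L, ∑ c ∈ Finset.Ico (0:ℤ) L,
        if (0 ≤ r + dr ∧ r + dr < L) ∧ (0 ≤ c + dc ∧ c + dc < L) then F r c else 0)
      = ∑ r ∈ Finset.Ico (0:ℤ) L, ∑ c ∈ Finset.Ico (0:ℤ) L,
        if (0 ≤ r - dr ∧ r - dr < L) ∧ (0 ≤ c - dc ∧ c - dc < L) then F (r - dr) (c - dc) else 0 := by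
  calc (∑ r ∈ Finset.Ico (0:ℤ) L, ∑ c ∈ Finset.Ico (0:ℤ) L,
        if (0 ≤ r + dr ∧ r + dr < L) ∧ (0 ≤ c + dc ∧ c + dc < L) then F r c else 0)
      = ∑ r ∈ Finset.Ico (0:ℤ) L, (if 0 ≤ r + dr ∧ r + dr < L then
          (∑ c ∈ Finset.Ico (0:ℤ) L, if 0 ≤ c + dc ∧ c + dc < L then F r c else 0) else 0) := by
        exact Finset.sum_congr rfl fun r _ =>
          ite_and_sum _ _ (fun c => 0 ≤ c + dc ∧ c + dc < L) (F r)
    _ = ∑ r ∈ Finset.Ico (0:ℤ) L, (if 0 ≤ r + dr ∧ r + dr < L then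
          (∑ c ∈ Finset.Ico (0:ℤ) L, if 0 ≤ c - dc ∧ c - dc < L then F r (c - dc) else 0) else 0) := by
        refine Finset.sum_congr rfl fun r _ => ?_
        by_cases h : 0 ≤ r + dr ∧ r + dr < L <;> simp [h, sum_shift1 L dc (F r)]
    _ = ∑ r ∈ Finset.Ico (0:ℤ) L, (if 0 ≤ r - dr ∧ r - dr < L then
          (∑ c ∈ Finset.Ico (0:ℤ) L, if 0 ≤ c - dc ∧ c - dc < L then F (r - dr) (c - dc) else 0) else 0) :=
        sum_shift1 L dr (fun r => ∑ c ∈ Finset.Ico (0:ℤ) L, if 0 ≤ c - dc ∧ c - dc < L then F r (c - dc) else 0)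
    _ = _ :=
        (Finset.sum_congr rfl fun r _ =>
          (ite_and_sum _ _ (fun c => 0 ≤ c - dc ∧ c - dc < L) (fun c => F (r - dr) (c - dc))).symm)

theorem piece_eq_finset (sp : List (List Int)) (n L dr dc : Int) :
    piece sp n L dr dc = ∑ r ∈ Finset.Ico (0:ℤ) L, ∑ c ∈ Finset.Ico (0:ℤ) L,
      pieceTerm sp n L dr dc r c := by
  unfold piece
  rw [sum_map_pyRange_one]
  exact Finset.sum_congr rfl fun r _ => by rw [sum_map_pyRange_one]

theorem mul_ite_one_zero (x : ℤ) (P : Prop) [Decidable P] :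
    x * (if P then (1:ℤ) else 0) = if P then x else 0 := by split <;> ring

theorem alt_eq (sp : List (List Int)) (n : Int) :
    sum_adjacent_numbers_alt sp n =
      piece sp n sp.length (-1) (-1) + piece sp n sp.length (-1) 0 + piece sp n sp.length (-1) 1
      + piece sp n sp.length 0 (-1) + piece sp n sp.length 0 1
      + piece sp n sp.length 1 (-1) + piece sp n sp.length 1 0 + piece sp n sp.length 1 1 := by
  have hstep : ∀ (r c : Int),
      (fun (count : Int) (dd : Int × Int) =>
        if 0 ≤ r + dd.1 ∧ r + dd.1 < (sp.length : Int) ∧ 0 ≤ c + dd.2 ∧ c + dd.2 < (sp.length : Int) ∧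
            PySem.List.pyGetD (PySem.List.pyGetD sp (r + dd.1) []) (c + dd.2) 0 = n then
          count + 1
        else count)
      = (fun count dd => count +
          if 0 ≤ r + dd.1 ∧ r + dd.1 < (sp.length : Int) ∧ 0 ≤ c + dd.2 ∧ c + dd.2 < (sp.length : Int) ∧
              PySem.List.pyGetD (PySem.List.pyGetD sp (r + dd.1) []) (c + dd.2) 0 = n then
            (1:ℤ) else 0) := by
    intro r c; funext k dd; split <;> ring
  unfold sum_adjacent_numbers_alt
  simp only [hstep, PySem.List.foldl_add]
  simp only [pvOFFSETS, List.map_cons, List.map_nil, List.sum_cons, List.sum_nil, add_zero,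
    zero_add, mul_add, mul_ite_one_zero, PySem.List.sum_map_add_int]
  simp only [piece, pieceTerm, gg]
  ring_nf

theorem pieceA_shift (sp : List (List Int)) (n L dr dc : Int) :
    (∑ r ∈ Finset.Ico (0:ℤ) L, ∑ c ∈ Finset.Ico (0:ℤ) L,
       if ((0 ≤ r + dr ∧ r + dr < L) ∧ (0 ≤ c + dc ∧ c + dc < L)) ∧ gg sp r c = n
       then gg sp (r + dr) (c + dc) else 0)
    = ∑ r ∈ Finset.Ico (0:ℤ) L, ∑ c ∈ Finset.Ico (0:ℤ) L, pieceTerm sp n L (-dr) (-dc) r c := by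
  have step1 : (∑ r ∈ Finset.Ico (0:ℤ) L, ∑ c ∈ Finset.Ico (0:ℤ) L,
       if ((0 ≤ r + dr ∧ r + dr < L) ∧ (0 ≤ c + dc ∧ c + dc < L)) ∧ gg sp r c = n
       then gg sp (r + dr) (c + dc) else 0)
      = ∑ r ∈ Finset.Ico (0:ℤ) L, ∑ c ∈ Finset.Ico (0:ℤ) L,
       if ((0 ≤ r + dr ∧ r + dr < L) ∧ (0 ≤ c + dc ∧ c + dc < L))
       then (if gg sp r c = n then gg sp (r + dr) (c + dc) else 0) else 0 :=
    Finset.sum_congr rfl fun r _ => Finset.sum_congr rfl fun c _ => by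
      by_cases hq : (0 ≤ r + dr ∧ r + dr < L) ∧ (0 ≤ c + dc ∧ c + dc < L) <;> simp [hq]
  rw [step1, sum_shift2]
  refine Finset.sum_congr rfl fun r _ => Finset.sum_congr rfl fun c _ => ?_
  simp only [pieceTerm, sub_eq_add_neg]
  split_ifs <;> simp_all

theorem pyRange_neg12 : PySem.List.pyRange (-1) 2 1 = [-1, 0, 1] := by decide

theorem ite_then_add (P : Int → Prop) [DecidablePred P] (X : Int → Int) :
    (fun (s : Int) (c : Int) => if P c then s + X c else s)
      = (fun s c => s + if P c then X c else 0) := by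
  funext s c; split <;> ring

def qTerm (sp : List (List Int)) (n L dr dc r c : Int) : Int :=
  if ((0 ≤ r + dr ∧ r + dr < L) ∧ (0 ≤ c + dc ∧ c + dc < L)) ∧ gg sp r c = n then
    gg sp (r + dr) (c + dc) else 0

theorem ite_in_bounds (sp : List (List Int)) (a b v : Int) :
    (if in_bounds sp a b = false then (0:ℤ) else v)
      = if (0 ≤ a ∧ a < (sp.length:Int)) ∧ (0 ≤ b ∧ b < (sp.length:Int)) then v else 0 := by
  have h : in_bounds sp a b = false ↔ ¬((0 ≤ a ∧ a < (sp.length:Int)) ∧ (0 ≤ b ∧ b < (sp.length:Int))) := by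
    simp [in_bounds]; omega
  by_cases hb : (0 ≤ a ∧ a < (sp.length:Int)) ∧ (0 ≤ b ∧ b < (sp.length:Int)) <;>
    simp [h.mpr, hb] <;> simp [h, hb]

theorem qTerm_sum_piece (sp : List (List Int)) (n L dr dc : Int) :
    (∑ r ∈ Finset.Ico (0:ℤ) L, ∑ c ∈ Finset.Ico (0:ℤ) L, qTerm sp n L dr dc r c)
      = piece sp n L (-dr) (-dc) := by
  unfold qTerm
  rw [pieceA_shift, ← piece_eq_finset]

theorem a_eq (sp : List (List Int)) (n : Int) :
    sum_adjacent_numbers sp n =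
      piece sp n sp.length 1 1 + piece sp n sp.length 1 0 + piece sp n sp.length 1 (-1)
      + piece sp n sp.length 0 1 + piece sp n sp.length 0 (-1)
      + piece sp n sp.length (-1) 1 + piece sp n sp.length (-1) 0 + piece sp n sp.length (-1) (-1) := by
  have hin : ∀ (row col rinc : Int),
      (fun (sum cinc : Int) =>
        if (!(in_bounds sp (row + rinc) (col + cinc)) || (decide (rinc = 0) && decide (cinc = 0))) = true then
          sum
        else sum + PySem.List.pyGetD (PySem.List.pyGetD sp (row + rinc) []) (col + cinc) 0)
      = (fun sum cinc => sum +
          if (!(in_bounds sp (row + rinc) (col + cinc)) || (decide (rinc = 0) && decide (cinc = 0))) = true then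
            0
          else PySem.List.pyGetD (PySem.List.pyGetD sp (row + rinc) []) (col + cinc) 0) := by
    intro row col rinc; funext s c; split <;> ring
  unfold sum_adjacent_numbers
  rw [pyRange_neg12]
  simp only [hin, PySem.List.foldl_add]
  simp only [ite_then_add, PySem.List.foldl_add, sum_map_pyRange_one, zero_add]
  simp only [List.map_cons, List.map_nil, List.sum_cons, List.sum_nil, add_zero]
  norm_num
  have hcongr : ∀ (f g : Int → Int → Int), (∀ r c, f r c = g r c) →
      (∑ r ∈ Finset.Ico (0:ℤ) (sp.length:Int), ∑ c ∈ Finset.Ico (0:ℤ) (sp.length:Int), f r c)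
        = ∑ r ∈ Finset.Ico (0:ℤ) (sp.length:Int), ∑ c ∈ Finset.Ico (0:ℤ) (sp.length:Int), g r c :=
    fun f g h => Finset.sum_congr rfl fun r _ => Finset.sum_congr rfl fun c _ => h r c
  rw [hcongr _ (fun r c =>
      qTerm sp n sp.length (-1) (-1) r c + qTerm sp n sp.length (-1) 0 r c
      + qTerm sp n sp.length (-1) 1 r c + qTerm sp n sp.length 0 (-1) r c
      + qTerm sp n sp.length 0 1 r c + qTerm sp n sp.length 1 (-1) r c
      + qTerm sp n sp.length 1 0 r c + qTerm sp n sp.length 1 1 r c) ?_]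
  · simp only [Finset.sum_add_distrib, qTerm_sum_piece]
    norm_num
  · intro r c
    by_cases hP : PySem.List.pyGetD (PySem.List.pyGetD sp r []) c 0 = n <;>
      simp [hP, qTerm, ite_in_bounds, gg] <;> ring


-- ===== VERDICT (by name: the statement is the Claim_ definition above) =====
theorem sum_adjacent_numbers_spec : Claim_equal_sum_adjacent_numbers := by
  intro spiral n _ _
  unfold Spec_sum_adjacent_numbers
  rw [a_eq, alt_eq]
  ring
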